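-- pv_equiv track=rewrite | github.com/TuringQ/deepquantum | src/deepquantum/cutting.py | map_qubit
-- ===== SOURCE A (Python) =====
-- from collections import defaultdict
-- from collections.abc import Sequence, Hashable
-- from typing import Callable, Dict, List, Optional, Tuple
--
-- def map_qubit(qubit_labels: Sequence[Hashable]) -> Tuple[List[Tuple], Dict[Hashable, List]]:
--     """Generate a qubit map given a qubit partitioning."""
--     qubit_map = []
--     label2qubits_dict = defaultdict(list)
--     for i, label in enumerate(qubit_labels):
--         if label is None:
--             qubit_map.append((None, None))
--         else:
--             qubits = label2qubits_dict[label]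
--             qubit_map.append((label, len(qubits)))
--             qubits.append(i)
--     return qubit_map, dict(label2qubits_dict)
-- ===== SOURCE B (Python) =====
-- def map_qubit(qubit_labels):
--     """Generate a qubit map given a qubit partitioning."""
--     label2qubits_dict = {}
--     for i, label in enumerate(qubit_labels):
--         if label is not None:
--             label2qubits_dict.setdefault(label, []).append(i)
--     qubit_map = [(None, None)] * len(qubit_labels)
--     for label, qubits in label2qubits_dict.items():
--         for rank, index in enumerate(qubits):
--             qubit_map[index] = (label, rank)
--     return qubit_map, label2qubits_dict
-- ===== Notes on version B (the rewrite author's own statement) =====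
-- stated objective: alternative
-- what changed: A builds qubit_map and the label dict together in one interleaved pass; B first groups indices by label in one pass, then allocates a placeholder-prefilled list of the input's length and scatters (label, rank) pairs into it from the dict's index lists.
import Mathlib
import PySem

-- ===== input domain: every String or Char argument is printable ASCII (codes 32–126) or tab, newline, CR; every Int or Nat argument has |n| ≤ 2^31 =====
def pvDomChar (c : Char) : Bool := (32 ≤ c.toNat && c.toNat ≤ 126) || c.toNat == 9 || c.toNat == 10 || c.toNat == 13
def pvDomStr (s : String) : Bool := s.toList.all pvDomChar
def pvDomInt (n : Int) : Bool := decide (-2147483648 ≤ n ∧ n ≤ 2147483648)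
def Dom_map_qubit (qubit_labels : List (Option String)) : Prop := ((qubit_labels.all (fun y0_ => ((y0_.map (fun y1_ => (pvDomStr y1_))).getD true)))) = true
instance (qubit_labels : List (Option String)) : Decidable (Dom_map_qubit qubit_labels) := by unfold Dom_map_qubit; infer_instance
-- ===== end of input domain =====

-- B replaces A's single interleaved pass by: one grouping pass building only the
-- label→indices dict, then a scatter of (label, rank) pairs into a pre-filled
-- placeholder-prefilled list of the input's length (objective: alternative decomposition).

-- ===== PORT A =====
-- single pass: qubit_map and the defaultdict(list) grow together
def map_qubit (qubit_labels : List (Option String)) :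
    (List (Option String × Option Int)) × (List (String × List Int)) :=
  let st := (PySem.List.enumerate qubit_labels).foldl
    (fun (st : List (Option String × Option Int) × PySem.Dict String (List Int)) p =>
      match p.2 with
      | none => (st.1 ++ [(none, none)], st.2)
      | some label =>
        let qubits := st.2.getD label []   -- defaultdict access (inserts [] if absent)
        (st.1 ++ [(some label, some (qubits.length : Int))],
         st.2.insert label (qubits ++ [p.1])))   -- qubits.append(i), mutating the dict's list
    ([], PySem.Dict.empty)
  (st.1, st.2.items)

-- ===== PORT B =====
-- pass 1: group indices by label (setdefault(label, []).append(i))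
-- pass 2: scatter (label, rank) into a (none, none)-prefilled list
def map_qubit_alt (qubit_labels : List (Option String)) :
    (List (Option String × Option Int)) × (List (String × List Int)) :=
  let d := (PySem.List.enumerate qubit_labels).foldl
    (fun (d : PySem.Dict String (List Int)) p =>
      match p.2 with
      | none => d
      | some label => d.insert label (d.getD label [] ++ [p.1]))
    PySem.Dict.empty
  let qm := d.items.foldl
    (fun qm pr =>
      (PySem.List.enumerate pr.2).foldl
        (fun qm q => qm.set q.2.toNat (some pr.1, some q.1)) qm)
    (List.replicate qubit_labels.length ((none, none) : Option String × Option Int))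
  (qm, d.items)

-- ===== PRECONDITION & SPEC =====
def Spec_map_qubit (qubit_labels : List (Option String)) (out : (List (Option String × Option Int)) × (List (String × List Int))) : Prop := out = map_qubit_alt qubit_labels
instance (qubit_labels : List (Option String)) (out : (List (Option String × Option Int)) × (List (String × List Int))) : Decidable (Spec_map_qubit qubit_labels out) := by unfold Spec_map_qubit; infer_instance

-- ===== CLAIM (what is proved, stated in full; the proofs are below) =====
def Claim_equal_map_qubit : Prop := ∀ (qubit_labels : List (Option String)), Dom_map_qubit qubit_labels → Spec_map_qubit qubit_labels (map_qubit qubit_labels)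

-- ===== LEMMAS AND PROOFS =====

-- named versions of the ports' fold bodies (helpers for the proofs only)
def pvAStep (st : List (Option String × Option Int) × PySem.Dict String (List Int))
    (p : Int × Option String) :
    List (Option String × Option Int) × PySem.Dict String (List Int) :=
  match p.2 with
  | none => (st.1 ++ [(none, none)], st.2)
  | some label =>
    let qubits := st.2.getD label []
    (st.1 ++ [(some label, some (qubits.length : Int))], st.2.insert label (qubits ++ [p.1]))

def pvDStep (d : PySem.Dict String (List Int)) (p : Int × Option String) :
    PySem.Dict String (List Int) :=
  match p.2 with
  | none => d
  | some label => d.insert label (d.getD label [] ++ [p.1])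

def pvInnerF (lab : String) (qm : List (Option String × Option Int)) (q : Int × Int) :
    List (Option String × Option Int) :=
  qm.set q.2.toNat (some lab, some q.1)

def pvInner (qm : List (Option String × Option Int)) (pr : String × List Int) :
    List (Option String × Option Int) :=
  (PySem.List.enumerate pr.2).foldl (pvInnerF pr.1) qm

def pvScatter (qm : List (Option String × Option Int)) (items : List (String × List Int)) :
    List (Option String × Option Int) :=
  items.foldl pvInner qm

theorem pv_A_eq (xs : List (Option String)) :
    map_qubit xs = (((PySem.List.enumerate xs).foldl pvAStep ([], PySem.Dict.empty)).1,
      ((PySem.List.enumerate xs).foldl pvAStep ([], PySem.Dict.empty)).2.items) := rfl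

theorem pv_B_eq (xs : List (Option String)) :
    map_qubit_alt xs =
      (pvScatter (List.replicate xs.length ((none, none) : Option String × Option Int))
        ((PySem.List.enumerate xs).foldl pvDStep PySem.Dict.empty).items,
       ((PySem.List.enumerate xs).foldl pvDStep PySem.Dict.empty).items) := rfl

-- A's dict component is B's dict fold
theorem pv_snd_foldl (l : List (Int × Option String))
    (q : List (Option String × Option Int)) (d : PySem.Dict String (List Int)) :
    (l.foldl pvAStep (q, d)).2 = l.foldl pvDStep d := by
  induction l generalizing q d with
  | nil => rfl
  | cons p l ih =>
    simp only [List.foldl_cons]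
    rcases p with ⟨i, (_ | lab)⟩
    · exact ih (q ++ [(none, none)]) d
    · exact ih _ _

theorem pv_fst_length (l : List (Int × Option String))
    (st : List (Option String × Option Int) × PySem.Dict String (List Int)) :
    (l.foldl pvAStep st).1.length = st.1.length + l.length := by
  induction l generalizing st with
  | nil => simp
  | cons p l ih =>
    simp only [List.foldl_cons]
    rw [ih]
    rcases p with ⟨i, (_ | lab)⟩ <;> simp [pvAStep] <;> omega

theorem pv_nodup_keys (l : List (Int × Option String)) (d : PySem.Dict String (List Int))
    (h : d.keys.Nodup) : (l.foldl pvDStep d).keys.Nodup := by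
  induction l generalizing d with
  | nil => exact h
  | cons p l ih =>
    simp only [List.foldl_cons]
    apply ih
    rcases p with ⟨i, (_ | lab)⟩
    · exact h
    · exact PySem.Dict.nodup_keys_insert _ _ _ h

-- every index stored in the dict built from `enumerate xs s` lies in [0, s + |xs|)
def pvBound (d : PySem.Dict String (List Int)) (c : Int) : Prop :=
  ∀ pr ∈ d.items, ∀ i ∈ pr.2, 0 ≤ i ∧ i < c

theorem pvBound_mono {d : PySem.Dict String (List Int)} {c c' : Int} (h : pvBound d c)
    (hc : c ≤ c') : pvBound d c' := by
  intro pr hpr i hi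
  rcases h pr hpr i hi with ⟨h1, h2⟩
  exact ⟨h1, lt_of_lt_of_le h2 hc⟩

theorem pv_getD_bound {d : PySem.Dict String (List Int)} {c : Int} (h : pvBound d c)
    (lab : String) : ∀ i ∈ d.getD lab [], 0 ≤ i ∧ i < c := by
  intro i hi
  rcases hget : d.get? lab with _ | v
  · rw [PySem.Dict.getD_of_get?_eq_none _ _ hget] at hi
    simp at hi
  · rw [PySem.Dict.getD_of_get?_eq_some _ _ hget] at hi
    exact h (lab, v) (PySem.Dict.mem_items_of_get?_eq_some _ hget) i hi

theorem pv_bound_foldl (xs : List (Option String)) :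
    ∀ (s : Int) (d : PySem.Dict String (List Int)), 0 ≤ s → pvBound d s →
      pvBound ((PySem.List.enumerate xs s).foldl pvDStep d) (s + xs.length) := by
  induction xs with
  | nil => intro s d _ h; simpa using h
  | cons x xs ih =>
    intro s d hs hd
    rw [PySem.List.enumerate_cons, List.foldl_cons]
    have hgoal : pvBound (pvDStep d (s, x)) (s + 1) := by
      rcases x with _ | lab
      · exact pvBound_mono hd (by omega)
      · intro pr hpr i hi
        have hpr' : pr ∈ (d.insert lab (d.getD lab [] ++ [s])).items := hpr
        rcases (PySem.Dict.mem_items_insert _ _ _ _).1 hpr' with heq | ⟨hmem, _⟩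
        · subst heq
          simp only at hi
          rcases List.mem_append.1 hi with hv | hlast
          · rcases pv_getD_bound hd lab i hv with ⟨h1, h2⟩
            exact ⟨h1, by omega⟩
          · simp at hlast
            omega
        · rcases hd pr hmem i hi with ⟨h1, h2⟩
          exact ⟨h1, by omega⟩
    have h2 := ih (s + 1) (pvDStep d (s, x)) (by omega) hgoal
    have harith : s + ((x :: xs).length : Int) = s + 1 + xs.length := by
      simp; ring
    rw [harith]
    exact h2

-- a set at a position no index of v touches commutes with the inner scatter loop
theorem pv_inner_set_comm (v : List Int) (s : Int) (lab : String)
    (qm : List (Option String × Option Int)) (t : Nat) (y : Option String × Option Int)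
    (hv : ∀ i ∈ v, i.toNat ≠ t) :
    (PySem.List.enumerate v s).foldl (pvInnerF lab) (qm.set t y) =
      ((PySem.List.enumerate v s).foldl (pvInnerF lab) qm).set t y := by
  induction v generalizing s qm with
  | nil => rfl
  | cons i v ih =>
    rw [PySem.List.enumerate_cons, List.foldl_cons, List.foldl_cons]
    show (PySem.List.enumerate v (s+1)).foldl (pvInnerF lab) (pvInnerF lab (qm.set t y) (s, i)) = _
    rw [show pvInnerF lab (qm.set t y) (s, i) = (pvInnerF lab qm (s, i)).set t y from
      List.set_comm _ _ (Ne.symm (hv i (by simp)))]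
    exact ih (s+1) _ (fun j hj => hv j (by simp [hj]))

theorem pv_scatter_set_comm (items : List (String × List Int))
    (qm : List (Option String × Option Int)) (t : Nat) (y : Option String × Option Int)
    (h : ∀ pr ∈ items, ∀ i ∈ pr.2, i.toNat ≠ t) :
    pvScatter (qm.set t y) items = (pvScatter qm items).set t y := by
  induction items generalizing qm with
  | nil => rfl
  | cons pr items ih =>
    show pvScatter (pvInner (qm.set t y) pr) items = _
    rw [show pvInner (qm.set t y) pr = (pvInner qm pr).set t y from
      pv_inner_set_comm pr.2 0 pr.1 qm t y (h pr (by simp))]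
    exact ih _ (fun p hp => h p (by simp [hp]))

theorem pv_inner_append (lab : String) (v : List Int) (k : Int)
    (qm : List (Option String × Option Int)) :
    pvInner qm (lab, v ++ [k]) =
      (pvInner qm (lab, v)).set k.toNat (some lab, some (v.length : Int)) := by
  unfold pvInner
  simp only [PySem.List.enumerate_append, List.foldl_append]
  simp [pvInnerF, PySem.List.enumerate_cons]

-- replacing the (unique) entry of `lab` by its value with one more index k appended
-- changes the scatter by exactly one write at position k
theorem pv_scatter_map_replace (lab : String) (v : List Int) (k : Int) :
    ∀ (items : List (String × List Int)) (qm : List (Option String × Option Int)),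
      (items.map (·.1)).Nodup → (lab, v) ∈ items →
      (∀ pr ∈ items, ∀ i ∈ pr.2, i.toNat ≠ k.toNat) →
      pvScatter qm (items.map (fun p => if p.1 == lab then (lab, v ++ [k]) else p)) =
        (pvScatter qm items).set k.toNat (some lab, some (v.length : Int)) := by
  intro items
  induction items with
  | nil => intro qm _ hmem _; simp at hmem
  | cons p rest ih =>
    intro qm hnd hmem hk
    rcases hpl : (p.1 == lab) with _ | _
    · have hpl' : p.1 ≠ lab := by simpa using hpl
      have hmem' : (lab, v) ∈ rest := by
        rcases List.mem_cons.1 hmem with h | h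
        · exact absurd (congrArg Prod.fst h).symm hpl'
        · exact h
      simp only [List.map_cons, hpl, Bool.false_eq_true, if_false]
      show pvScatter (pvInner qm p) (rest.map _) = _
      exact ih (pvInner qm p) (List.nodup_cons.1 hnd).2 hmem'
        (fun pr hpr => hk pr (by simp [hpr]))
    · have hpl' : p.1 = lab := by simpa using hpl
      have hp : p = (lab, v) := by
        rcases List.mem_cons.1 hmem with h | h
        · exact h.symm
        · exfalso
          have hmm : lab ∈ rest.map (·.1) := List.mem_map.2 ⟨(lab, v), h, rfl⟩
          exact (List.nodup_cons.1 hnd).1 (by simpa [hpl'] using hmm)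
      subst hp
      have hrest : rest.map (fun p => if p.1 == lab then (lab, v ++ [k]) else p) = rest := by
        have hmc : rest.map (fun p => if p.1 == lab then (lab, v ++ [k]) else p) = rest.map id := by
          apply List.map_congr_left
          intro q hq
          have hq1 : q.1 ≠ lab := by
            intro h
            apply (List.nodup_cons.1 hnd).1
            rw [← h]
            exact List.mem_map_of_mem (f := fun p => p.1) hq
          simp [hq1]
        simpa using hmc
      simp only [List.map_cons, hpl, if_true, hrest]
      show pvScatter (pvInner qm (lab, v ++ [k])) rest = _
      rw [pv_inner_append]
      exact pv_scatter_set_comm rest _ _ _ (fun pr hpr => hk pr (by simp [hpr]))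

-- scattering the dict after one per-element update = scattering the old dict, then one write
theorem pv_scatter_insert (d : PySem.Dict String (List Int))
    (qm : List (Option String × Option Int)) (lab : String) (k : Int)
    (hnd : d.keys.Nodup) (hk : ∀ pr ∈ d.items, ∀ i ∈ pr.2, i.toNat ≠ k.toNat) :
    pvScatter qm (d.insert lab (d.getD lab [] ++ [k])).items =
      (pvScatter qm d.items).set k.toNat (some lab, some ((d.getD lab []).length : Int)) := by
  rcases hc : d.contains lab with _ | _
  · rw [PySem.Dict.items_insert_of_not_contains _ _ hc,
        PySem.Dict.getD_of_not_contains _ _ hc]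
    unfold pvScatter
    rw [List.foldl_append]
    show pvInner (pvScatter qm d.items) (lab, [] ++ [k]) = _
    rw [pv_inner_append]
    rfl
  · rcases hget : d.get? lab with _ | v
    · rw [PySem.Dict.contains_eq_isSome_get?, hget] at hc
      simp at hc
    have hgetD : d.getD lab [] = v := PySem.Dict.getD_of_get?_eq_some _ _ hget
    rw [PySem.Dict.items_insert_of_contains _ _ hc, hgetD]
    exact pv_scatter_map_replace lab v k d.items qm hnd
      (PySem.Dict.mem_items_of_get?_eq_some _ hget) hk

-- main invariant, by induction from the right end of the input
theorem pv_main (xs : List (Option String)) :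
    ∀ m : Nat,
      pvScatter (List.replicate (xs.length + m) ((none, none) : Option String × Option Int))
        ((PySem.List.enumerate xs).foldl pvAStep ([], PySem.Dict.empty)).2.items =
      ((PySem.List.enumerate xs).foldl pvAStep ([], PySem.Dict.empty)).1 ++
        List.replicate m ((none, none) : Option String × Option Int) := by
  induction xs using List.reverseRecOn with
  | nil =>
    intro m
    simp [pvScatter, PySem.List.enumerate_nil, PySem.Dict.empty]
  | append_singleton xs x ih =>
    intro m
    have henum : PySem.List.enumerate (xs ++ [x]) (0 : Int) =
        PySem.List.enumerate xs 0 ++ [((xs.length : Int), x)] := by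
      rw [PySem.List.enumerate_append]
      norm_num
    set st := (PySem.List.enumerate xs).foldl pvAStep ([], PySem.Dict.empty) with hst
    have hlen : st.1.length = xs.length := by
      rw [hst, pv_fst_length]
      simp [PySem.List.length_enumerate]
    have hdict : st.2 = (PySem.List.enumerate xs).foldl pvDStep PySem.Dict.empty := by
      rw [hst]
      exact pv_snd_foldl _ _ _
    have hnd : st.2.keys.Nodup := by
      rw [hdict]
      exact pv_nodup_keys _ _ (by rw [PySem.Dict.keys_empty]; exact List.nodup_nil)
    have hb : pvBound st.2 (xs.length : Int) := by
      rw [hdict]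
      have hb0 : pvBound PySem.Dict.empty (0 : Int) := by
        intro pr hpr
        simp [PySem.Dict.empty] at hpr
      have := pv_bound_foldl xs 0 PySem.Dict.empty le_rfl hb0
      simpa using this
    have hk : ∀ pr ∈ st.2.items, ∀ i ∈ pr.2, i.toNat ≠ ((xs.length : Int)).toNat := by
      intro pr hpr i hi
      rcases hb pr hpr i hi with ⟨h1, h2⟩
      omega
    rw [henum, List.foldl_append, ← hst, List.foldl_cons, List.foldl_nil]
    rcases x with _ | lab
    · show pvScatter _ st.2.items = st.1 ++ [((none : Option String), (none : Option Int))] ++ _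
      have hih := ih (m + 1)
      rw [show xs.length + (m + 1) = (xs ++ [(none : Option String)]).length + m by
        simp; omega] at hih
      rw [hih]
      simp [List.replicate_succ]
    · show pvScatter _ (st.2.insert lab (st.2.getD lab [] ++ [((xs.length : Int))])).items =
        st.1 ++ [((some lab : Option String),
          (some ((st.2.getD lab []).length : Int) : Option Int))] ++ _
      rw [pv_scatter_insert st.2 _ lab _ hnd hk]
      have hih := ih (m + 1)
      rw [show xs.length + (m + 1) = (xs ++ [some lab]).length + m by simp; omega] at hih
      rw [hih, List.replicate_succ,
        List.set_append_right _ _ (by simp [hlen])]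
      simp [hlen]

theorem map_qubit_main : ∀ xs, map_qubit xs = map_qubit_alt xs := by
  intro xs
  rw [pv_A_eq, pv_B_eq]
  have hsnd : ((PySem.List.enumerate xs).foldl pvAStep ([], PySem.Dict.empty)).2 =
      (PySem.List.enumerate xs).foldl pvDStep PySem.Dict.empty := pv_snd_foldl _ _ _
  rw [← hsnd]
  have hmain := pv_main xs 0
  simp only [Nat.add_zero, List.replicate_zero, List.append_nil] at hmain
  rw [hmain]

-- ===== VERDICT (by name: the statement is the Claim_ definition above) =====
theorem map_qubit_spec : Claim_equal_map_qubit := by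
  intro xs _
  unfold Spec_map_qubit
  exact map_qubit_main xs
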